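-- pv_equiv track=rewrite | github.com/sagarmcoder/caps_guard_public | src/core/langgraph_flow.py | _last_action_result
-- ===== SOURCE A (Python) =====
-- from typing import Any, Dict, TypedDict
--
-- def _last_action_result(execution_results: list[Dict[str, Any]]) -> Dict[str, Any] | None:
--     for step in reversed(execution_results):
--         status = step.get("status")
--         if status in {"skipped_by_condition", "ok", "blocked_policy_violation"} or str(status).startswith("failed_") or str(status).startswith("blocked_"):
--             return {
--                 "step_id": step.get("step_id"),
--                 "type": step.get("type"),
--                 "status": status,
--             }
--     return None
-- ===== SOURCE B (Python) =====
-- def _is_terminal(status):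
--     if status in ("skipped_by_condition", "ok", "blocked_policy_violation"):
--         return True
--     s = str(status)
--     return s[:7] == "failed_" or s[:8] == "blocked_"
--
--
-- def _last_action_result(execution_results):
--     matches = [step for step in execution_results if _is_terminal(step.get("status"))]
--     if not matches:
--         return None
--     last = matches[-1]
--     return {
--         "step_id": last.get("step_id"),
--         "type": last.get("type"),
--         "status": last.get("status"),
--     }
-- ===== Notes on version B (the rewrite author's own statement) =====
-- stated objective: alternative
-- what changed: B first filters the terminal-status steps with a standalone predicate helper (written with slice comparisons instead of startswith), then takes the last element of that filtered list and builds the result from it, instead of A's reversed() iteration with an early return.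
import Mathlib
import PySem

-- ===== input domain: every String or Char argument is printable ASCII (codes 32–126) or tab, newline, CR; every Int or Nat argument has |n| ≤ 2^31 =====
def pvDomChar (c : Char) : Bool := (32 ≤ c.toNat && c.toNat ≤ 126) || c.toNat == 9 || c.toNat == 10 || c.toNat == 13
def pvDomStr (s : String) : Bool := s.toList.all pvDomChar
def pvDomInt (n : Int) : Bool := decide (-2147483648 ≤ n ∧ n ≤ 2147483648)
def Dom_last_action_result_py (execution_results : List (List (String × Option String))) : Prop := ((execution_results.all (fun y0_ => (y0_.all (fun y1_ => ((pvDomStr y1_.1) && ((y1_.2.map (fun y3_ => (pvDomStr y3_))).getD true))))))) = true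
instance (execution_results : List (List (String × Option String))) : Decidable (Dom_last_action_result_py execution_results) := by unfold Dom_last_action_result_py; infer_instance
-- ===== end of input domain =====

-- B filters the terminal-status steps (predicate written with slice comparisons) and takes the
-- last element of the filtered list, instead of A's reversed() scan with an early return
-- (objective: alternative decomposition, same O(n) cost).


-- ===== PORT A =====
-- step.get(k): first-match association-list lookup; missing key → none (Python None).
def pvGetKey (step : List (String × Option String)) (k : String) : Option String :=
  match step with
  | [] => none
  | (k', v) :: rest => if k' == k then v else pvGetKey rest k

-- str(status) for status : Option String (None → "None").
def pvStrOf (status : Option String) : String :=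
  match status with
  | none => "None"
  | some s => s

-- A's if-condition, verbatim
def pvStatusMatch (status : Option String) : Bool :=
  (status == some "skipped_by_condition" || status == some "ok" || status == some "blocked_policy_violation")
    || PySem.Str.startswith (pvStrOf status) "failed_"
    || PySem.Str.startswith (pvStrOf status) "blocked_"

-- the dict A builds for a matching step
def pvMkResult (step : List (String × Option String)) : List (String × Option String) :=
  [("step_id", pvGetKey step "step_id"), ("type", pvGetKey step "type"), ("status", pvGetKey step "status")]

-- A's loop over reversed(execution_results): return on the first match
def pvLoopA (steps : List (List (String × Option String))) : Option (List (String × Option String)) :=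
  match steps with
  | [] => none
  | step :: rest => if pvStatusMatch (pvGetKey step "status") then some (pvMkResult step) else pvLoopA rest

def last_action_result_py (execution_results : List (List (String × Option String))) : Option (List (String × Option String)) :=
  pvLoopA execution_results.reverse

-- ===== PORT B =====
-- B's step.get(k), via the PySem dict primitive (first match; default None)
def altGet (step : List (String × Option String)) (k : String) : Option String :=
  ((PySem.Dict.mk step).get? k).getD none

-- _is_terminal: tuple membership (elementwise ==), then two prefix checks done as slice comparisons s[:7]/s[:8]
def altIsTerminal (status : Option String) : Bool :=
  if status == some "skipped_by_condition" || status == some "ok" || status == some "blocked_policy_violation" then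
    true
  else
    let s := status.getD "None"
    PySem.Str.slice s none (some 7) == "failed_" || PySem.Str.slice s none (some 8) == "blocked_"

def last_action_result_py_alt (execution_results : List (List (String × Option String))) : Option (List (String × Option String)) :=
  match (execution_results.filter (fun step => altIsTerminal (altGet step "status"))).getLast? with
  | none => none
  | some last =>
      some [("step_id", altGet last "step_id"), ("type", altGet last "type"), ("status", altGet last "status")]

-- ===== PRECONDITION & SPEC =====
def Spec_last_action_result_py (execution_results : List (List (String × Option String))) (out : Option (List (String × Option String))) : Prop := out = last_action_result_py_alt execution_results
instance (execution_results : List (List (String × Option String))) (out : Option (List (String × Option String))) : Decidable (Spec_last_action_result_py execution_results out) := by unfold Spec_last_action_result_py; infer_instance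

-- ===== CLAIM (what is proved, stated in full; the proofs are below) =====
def Claim_equal_last_action_result_py : Prop := ∀ (execution_results : List (List (String × Option String))), Dom_last_action_result_py execution_results → Spec_last_action_result_py execution_results (last_action_result_py execution_results)

-- ===== LEMMAS AND PROOFS =====
theorem altGet_eq (step : List (String × Option String)) (k : String) :
    altGet step k = pvGetKey step k := by
  induction step with
  | nil => rfl
  | cons x rest ih =>
    obtain ⟨k', v⟩ := x
    simp only [altGet, PySem.Dict.get?_mk_cons] at *
    by_cases h : (k' == k) = true <;> simp [h, pvGetKey, ih]

theorem slice_eq_startswith (s p : String) (n : Int) (hn : n = (p.toList.length : Int)) :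
    (PySem.Str.slice s none (some n) == p) = PySem.Str.startswith s p := by
  subst hn
  rcases h : PySem.Str.startswith s p with _ | _
  · rw [beq_eq_false_iff_ne]
    intro hc
    rw [PySem.Str.startswith_eq, ← Bool.not_eq_true, PySem.Chars.startswith_iff] at h
    apply absurd _ h
    rw [List.prefix_iff_eq_take]
    have := congrArg String.toList hc
    simpa [PySem.Str.toList_slice, PySem.Chars.slice_eq_listSlice,
      PySem.List.slice_to_natCast] using this.symm
  · rw [PySem.Str.startswith_eq, PySem.Chars.startswith_iff] at h
    rw [beq_iff_eq]
    apply String.toList_inj.mp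
    rw [List.prefix_iff_eq_take] at h
    simpa [PySem.Str.toList_slice, PySem.Chars.slice_eq_listSlice,
      PySem.List.slice_to_natCast] using h.symm

theorem altIsTerminal_eq (status : Option String) :
    altIsTerminal status = pvStatusMatch status := by
  have hs : status.getD "None" = pvStrOf status := by cases status <;> rfl
  have h7 := slice_eq_startswith (pvStrOf status) "failed_" 7 (by decide)
  have h8 := slice_eq_startswith (pvStrOf status) "blocked_" 8 (by decide)
  unfold altIsTerminal pvStatusMatch
  cases hd : (status == some "skipped_by_condition" || status == some "ok"
      || status == some "blocked_policy_violation")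
  · rw [if_neg (by simp [hd])]
    simp only [hs, Bool.false_or]
    rw [h7, h8]
  · simp

theorem altMk_eq (step : List (String × Option String)) :
    [("step_id", altGet step "step_id"), ("type", altGet step "type"), ("status", altGet step "status")]
      = pvMkResult step := by
  simp [altGet_eq, pvMkResult]

-- A's first-match loop is head? of the filtered list
theorem pvLoopA_eq_filter_head (m : List (List (String × Option String))) :
    pvLoopA m = ((m.filter (fun step => altIsTerminal (altGet step "status"))).head?).map pvMkResult := by
  induction m with
  | nil => rfl
  | cons x rest ih =>
    simp only [pvLoopA, List.filter_cons, altIsTerminal_eq, altGet_eq]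
    by_cases h : pvStatusMatch (pvGetKey x "status") = true <;> simp [h, ih, altIsTerminal_eq, altGet_eq]

-- ===== VERDICT (by name: the statement is the Claim_ definition above) =====
theorem last_action_result_py_spec : Claim_equal_last_action_result_py := by
  intro execution_results _
  unfold Spec_last_action_result_py last_action_result_py last_action_result_py_alt
  rw [pvLoopA_eq_filter_head, List.filter_reverse, List.head?_reverse]
  cases h : (execution_results.filter (fun step => altIsTerminal (altGet step "status"))).getLast? with
  | none => simp
  | some last => simp [altMk_eq]
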